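-- pv_equiv track=rewrite | github.com/sumsuddin/BanglaNER | src/data/make_dataset.py | map_tags
-- ===== SOURCE A (Python) =====
-- def map_tags(tags):
--     mapped_tags = []
--
--     tag_map = {
--         "U-PERSON": "B-PER",
--         "B-PERSON": "B-PER",
--         "I-PERSON": "I-PER",
--         "L-PERSON": "I-PER",
--         "U-GPE": "B-LOC",
--         "B-GPE": "B-LOC",
--         "I-GPE": "I-LOC",
--         "L-GPE": "I-LOC",
--         "U-ORG": "B-ORG",
--         "B-ORG": "B-ORG",
--         "I-ORG": "I-ORG",
--         "L-ORG": "I-ORG",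
--         "U-DATE": "B-TIM",
--         "B-DATE": "B-TIM",
--         "I-DATE": "I-TIM",
--         "L-DATE": "I-TIM"
--     }
--
--     for tag in tags:
--         if tag in tag_map.keys():
--             mapped_tags.append(tag_map[tag])
--         else:
--             mapped_tags.append("O")
--
--     return mapped_tags
-- ===== SOURCE B (Python) =====
-- def map_tags(tags):
--     prefix_map = {"U": "B", "B": "B", "I": "I", "L": "I"}
--     type_map = {"PERSON": "PER", "GPE": "LOC", "ORG": "ORG", "DATE": "TIM"}
--     return [
--         prefix_map[tag[:1]] + "-" + type_map[tag[2:]]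
--         if tag[1:2] == "-" and tag[:1] in prefix_map and tag[2:] in type_map
--         else "O"
--         for tag in tags
--     ]
-- ===== Notes on version B (the rewrite author's own statement) =====
-- stated objective: simpler
-- what changed: Replaces the flat 16-entry lookup table with a prefix/type decomposition: the tag is sliced into prefix, separator and entity type, mapped through two 4-entry dicts, and the result is recomposed; anything that fails the decomposition maps to 'O'.
import Mathlib
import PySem

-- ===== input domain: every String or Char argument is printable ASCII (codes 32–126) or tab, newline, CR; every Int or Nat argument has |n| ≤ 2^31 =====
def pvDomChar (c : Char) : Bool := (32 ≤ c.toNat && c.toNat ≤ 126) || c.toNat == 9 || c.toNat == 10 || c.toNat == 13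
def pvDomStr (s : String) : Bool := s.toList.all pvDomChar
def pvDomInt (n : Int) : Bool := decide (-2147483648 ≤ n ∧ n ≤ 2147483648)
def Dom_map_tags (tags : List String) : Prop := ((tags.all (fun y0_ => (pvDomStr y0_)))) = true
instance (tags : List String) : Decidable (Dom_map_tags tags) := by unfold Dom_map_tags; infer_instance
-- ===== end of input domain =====

-- B replaces A's flat 16-entry table with a prefix/type decomposition through two 4-entry dicts (objective: simpler).

-- ===== PORT A =====
def pvTagMap : PySem.Dict String String := PySem.Dict.mk
  [("U-PERSON","B-PER"),("B-PERSON","B-PER"),("I-PERSON","I-PER"),("L-PERSON","I-PER"),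
   ("U-GPE","B-LOC"),("B-GPE","B-LOC"),("I-GPE","I-LOC"),("L-GPE","I-LOC"),
   ("U-ORG","B-ORG"),("B-ORG","B-ORG"),("I-ORG","I-ORG"),("L-ORG","I-ORG"),
   ("U-DATE","B-TIM"),("B-DATE","B-TIM"),("I-DATE","I-TIM"),("L-DATE","I-TIM")]

-- tag_map[tag] is guarded by 'tag in tag_map.keys()', so the getD default is never read
def pvATag (tag : String) : String :=
  if tag ∈ pvTagMap.keys then pvTagMap.getD tag "O" else "O"

def map_tags (tags : List String) : List String :=
  tags.foldl (fun mapped_tags tag => mapped_tags ++ [pvATag tag]) []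

-- ===== PORT B =====
def pvPrefixMap : PySem.Dict String String := PySem.Dict.mk
  [("U","B"),("B","B"),("I","I"),("L","I")]
def pvTypeMap : PySem.Dict String String := PySem.Dict.mk
  [("PERSON","PER"),("GPE","LOC"),("ORG","ORG"),("DATE","TIM")]

-- the dict subscripts are guarded by the 'in' tests, so the getD defaults are never read
def pvBTag (tag : String) : String :=
  if PySem.Str.slice tag (some 1) (some 2) = "-"
      ∧ pvPrefixMap.contains (PySem.Str.slice tag none (some 1)) = true
      ∧ pvTypeMap.contains (PySem.Str.slice tag (some 2) none) = true then
    pvPrefixMap.getD (PySem.Str.slice tag none (some 1)) "" ++ "-"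
      ++ pvTypeMap.getD (PySem.Str.slice tag (some 2) none) ""
  else "O"

def map_tags_alt (tags : List String) : List String :=
  tags.map pvBTag

-- ===== PRECONDITION & SPEC =====
def Spec_map_tags (tags : List String) (out : List String) : Prop := out = map_tags_alt tags
instance (tags : List String) (out : List String) : Decidable (Spec_map_tags tags out) := by unfold Spec_map_tags; infer_instance

-- ===== CLAIM (what is proved, stated in full; the proofs are below) =====
def Claim_equal_map_tags : Prop := ∀ (tags : List String), Dom_map_tags tags → Spec_map_tags tags (map_tags tags)

-- ===== LEMMAS AND PROOFS =====

-- a string whose slices [:1], [1:2], [2:] are p, "-", t is p ++ "-" ++ t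
lemma pv_recon (s p t : String)
    (hp : PySem.Str.slice s none (some 1) = p)
    (hsep : PySem.Str.slice s (some 1) (some 2) = "-")
    (ht : PySem.Str.slice s (some 2) none = t) :
    s.toList = p.toList ++ '-' :: t.toList := by
  have hp' : s.toList.take 1 = p.toList := by
    rw [← hp, PySem.Str.toList_slice, PySem.Chars.slice_eq_listSlice, PySem.List.slice_to] <;> norm_num
  have hsep' : (s.toList.drop 1).take 1 = ['-'] := by
    have := congrArg String.toList hsep
    rw [PySem.Str.toList_slice, PySem.Chars.slice_eq_listSlice, PySem.List.slice_toNat] at this <;> try norm_num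
    simpa using this
  have ht' : s.toList.drop 2 = t.toList := by
    rw [← ht, PySem.Str.toList_slice, PySem.Chars.slice_eq_listSlice, PySem.List.slice_from] <;> simp
  have h2 : s.toList.drop 1 = (s.toList.drop 1).take 1 ++ s.toList.drop 2 := by
    have := (List.take_append_drop 1 (s.toList.drop 1)).symm
    rw [List.drop_drop] at this
    simpa using this
  calc s.toList = s.toList.take 1 ++ s.toList.drop 1 := (List.take_append_drop 1 _).symm
    _ = p.toList ++ '-' :: t.toList := by rw [h2, hp', hsep', ht']; simp

lemma pv_tag_eq (s : String) : pvATag s = pvBTag s := by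
  by_cases hk : s ∈ (["U-PERSON","B-PERSON","I-PERSON","L-PERSON","U-GPE","B-GPE","I-GPE","L-GPE",
      "U-ORG","B-ORG","I-ORG","L-ORG","U-DATE","B-DATE","I-DATE","L-DATE"] : List String)
  · simp only [List.mem_cons, List.not_mem_nil, or_false] at hk
    rcases hk with rfl|rfl|rfl|rfl|rfl|rfl|rfl|rfl|rfl|rfl|rfl|rfl|rfl|rfl|rfl|rfl <;> decide
  · simp only [List.mem_cons, List.not_mem_nil, or_false, not_or] at hk
    obtain ⟨h1,h2,h3,h4,h5,h6,h7,h8,h9,h10,h11,h12,h13,h14,h15,h16⟩ := hk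
    have hA : pvATag s = "O" := by
      rw [pvATag, if_neg]
      intro hmem
      simp [pvTagMap, PySem.Dict.keys] at hmem
      tauto
    have hB : pvBTag s = "O" := by
      rw [pvBTag, if_neg]
      rintro ⟨hs, hp, ht⟩
      simp [pvPrefixMap, PySem.Dict.contains_mk] at hp
      simp [pvTypeMap, PySem.Dict.contains_mk] at ht
      rcases hp with hp|hp|hp|hp <;> rcases ht with ht|ht|ht|ht <;>
        first
          | exact h1 (String.toList_inj.mp (by rw [pv_recon s _ _ hp.symm hs ht.symm]; decide))
          | exact h2 (String.toList_inj.mp (by rw [pv_recon s _ _ hp.symm hs ht.symm]; decide))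
          | exact h3 (String.toList_inj.mp (by rw [pv_recon s _ _ hp.symm hs ht.symm]; decide))
          | exact h4 (String.toList_inj.mp (by rw [pv_recon s _ _ hp.symm hs ht.symm]; decide))
          | exact h5 (String.toList_inj.mp (by rw [pv_recon s _ _ hp.symm hs ht.symm]; decide))
          | exact h6 (String.toList_inj.mp (by rw [pv_recon s _ _ hp.symm hs ht.symm]; decide))
          | exact h7 (String.toList_inj.mp (by rw [pv_recon s _ _ hp.symm hs ht.symm]; decide))
          | exact h8 (String.toList_inj.mp (by rw [pv_recon s _ _ hp.symm hs ht.symm]; decide))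
          | exact h9 (String.toList_inj.mp (by rw [pv_recon s _ _ hp.symm hs ht.symm]; decide))
          | exact h10 (String.toList_inj.mp (by rw [pv_recon s _ _ hp.symm hs ht.symm]; decide))
          | exact h11 (String.toList_inj.mp (by rw [pv_recon s _ _ hp.symm hs ht.symm]; decide))
          | exact h12 (String.toList_inj.mp (by rw [pv_recon s _ _ hp.symm hs ht.symm]; decide))
          | exact h13 (String.toList_inj.mp (by rw [pv_recon s _ _ hp.symm hs ht.symm]; decide))
          | exact h14 (String.toList_inj.mp (by rw [pv_recon s _ _ hp.symm hs ht.symm]; decide))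
          | exact h15 (String.toList_inj.mp (by rw [pv_recon s _ _ hp.symm hs ht.symm]; decide))
          | exact h16 (String.toList_inj.mp (by rw [pv_recon s _ _ hp.symm hs ht.symm]; decide))
    rw [hA, hB]

lemma pv_fold_eq (tags : List String) (acc : List String) :
    tags.foldl (fun mapped_tags tag => mapped_tags ++ [pvATag tag]) acc = acc ++ tags.map pvBTag := by
  induction tags generalizing acc with
  | nil => simp
  | cons x xs ih => rw [List.foldl_cons, ih, List.map_cons, pv_tag_eq]; simp

-- ===== VERDICT (by name: the statement is the Claim_ definition above) =====
theorem map_tags_spec : Claim_equal_map_tags := by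
  intro tags _
  unfold Spec_map_tags map_tags map_tags_alt
  simpa using pv_fold_eq tags []
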